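-- pv_equiv track=rewrite | github.com/flathub/flathub | eu.capybaracode.FilenameNinja/src/filename_ninja/ui/about_dialog.py | _parse_project_url_values
-- ===== SOURCE A (Python) =====
-- def _parse_project_url_values(values: list[str] | None) -> dict[str, str]:
--     parsed: dict[str, str] = {"homepage": "", "repository": ""}
--     if not values:
--         return parsed
--
--     for item in values:
--         if "," not in item:
--             continue
--         label, url = item.split(",", 1)
--         label_norm = label.strip().lower()
--         url = url.strip()
--         if not url:
--             continue
--
--         if label_norm in {"homepage", "home", "website"} and not parsed["homepage"]:
--             parsed["homepage"] = url
--         elif label_norm in {"repository", "source", "vcs", "vcs-browser"} and not parsed["repository"]: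
--             parsed["repository"] = url
--
--     return parsed
-- ===== SOURCE B (Python) =====
-- def _parse_project_url_values(values):
--     if not values:
--         return {"homepage": "", "repository": ""}
--     pairs = [
--         (label.strip().lower(), url.strip())
--         for item in values
--         if "," in item
--         for label, url in [item.split(",", 1)]
--         if url.strip()
--     ]
--     home = next((u for l, u in pairs if l in ("homepage", "home", "website")), "")
--     repo = next((u for l, u in pairs if l in ("repository", "source", "vcs", "vcs-browser")), "")
--     return {"homepage": home, "repository": repo}
-- ===== Notes on version B (the rewrite author's own statement) =====
-- stated objective: simpler
-- what changed: Replaces the single interleaved loop that mutates a dict under two first-write guards with a declarative decomposition: one comprehension normalizing all label/url pairs, then two independent first-match selections (next) assemble the result.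
import Mathlib
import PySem

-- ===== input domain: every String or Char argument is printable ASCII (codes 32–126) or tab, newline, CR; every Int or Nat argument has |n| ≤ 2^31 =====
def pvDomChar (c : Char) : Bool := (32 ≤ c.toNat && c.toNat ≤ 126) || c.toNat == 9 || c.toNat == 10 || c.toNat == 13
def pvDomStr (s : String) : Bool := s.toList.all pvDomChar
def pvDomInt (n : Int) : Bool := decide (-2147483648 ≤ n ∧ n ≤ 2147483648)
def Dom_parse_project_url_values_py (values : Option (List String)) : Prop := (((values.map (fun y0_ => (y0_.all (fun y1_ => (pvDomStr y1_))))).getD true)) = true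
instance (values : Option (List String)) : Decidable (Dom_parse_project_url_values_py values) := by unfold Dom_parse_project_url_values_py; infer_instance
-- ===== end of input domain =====

-- B is a simpler decomposition of the same task (normalize-all pairs, then two independent
-- first-match selections) instead of A's interleaved dict-mutating loop; same cost, no speed claim.

-- label sets, as in both Pythons
def pvHomeLabels : List String := ["homepage", "home", "website"]
def pvRepoLabels : List String := ["repository", "source", "vcs", "vcs-browser"]

-- ===== PORT A =====
-- one iteration of A's for-loop over `parsed`
def pvStepA (parsed : PySem.Dict String String) (item : String) : PySem.Dict String String :=
  if PySem.Str.isIn "," item = false then parsed   -- "," not in item → continue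
  else
    -- label, url = item.split(",", 1)  (the split has exactly two pieces since "," is in item)
    let parts := (PySem.Str.splitMax? item "," 1).getD []
    let label := parts[0]?.getD ""   -- destructuring: the split has exactly two pieces
    let label_norm := PySem.Str.lower (PySem.Str.strip label)
    let url := PySem.Str.strip (parts[1]?.getD "")
    if url = "" then parsed   -- continue
    else if label_norm ∈ pvHomeLabels ∧ parsed.getD "homepage" "" = "" then
      parsed.insert "homepage" url
    else if label_norm ∈ pvRepoLabels ∧ parsed.getD "repository" "" = "" then
      parsed.insert "repository" url
    else parsed

def parse_project_url_values_py (values : Option (List String)) : List (String × String) :=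
  let parsed : PySem.Dict String String := (PySem.Dict.empty.insert "homepage" "").insert "repository" ""
  match values with
  | none => parsed.items                                  -- `if not values: return parsed`
  | some vs =>
    if vs = [] then parsed.items
    else (vs.foldl pvStepA parsed).items

-- ===== PORT B =====
-- the normalizing comprehension of Source B
def pvPairs (vs : List String) : List (String × String) :=
  vs.filterMap (fun item =>
    if PySem.Str.isIn "," item then
      let parts := (PySem.Str.splitMax? item "," 1).getD []
      let l := PySem.Str.lower (PySem.Str.strip (parts[0]?.getD ""))
      let u := PySem.Str.strip (parts[1]?.getD "")
      if u = "" then none else some (l, u)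
    else none)

-- next((u for l, u in pairs if p (l, u)), "")
def pvNextD (p : String × String → Bool) (pairs : List (String × String)) : String :=
  ((pairs.find? p).map (·.2)).getD ""

def parse_project_url_values_py_alt (values : Option (List String)) : List (String × String) :=
  match values with
  | none => [("homepage", ""), ("repository", "")]
  | some vs =>
    if vs = [] then [("homepage", ""), ("repository", "")]
    else
      let pairs := pvPairs vs
      let home := pvNextD (fun p => decide (p.1 ∈ pvHomeLabels)) pairs
      let repo := pvNextD (fun p => decide (p.1 ∈ pvRepoLabels)) pairs
      [("homepage", home), ("repository", repo)]

-- ===== PRECONDITION & SPEC =====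
def Spec_parse_project_url_values_py (values : Option (List String)) (out : List (String × String)) : Prop := out = parse_project_url_values_py_alt values
instance (values : Option (List String)) (out : List (String × String)) : Decidable (Spec_parse_project_url_values_py values out) := by unfold Spec_parse_project_url_values_py; infer_instance

-- ===== CLAIM (what is proved, stated in full; the proofs are below) =====
def Claim_equal_parse_project_url_values_py : Prop := ∀ (values : Option (List String)), Dom_parse_project_url_values_py values → Spec_parse_project_url_values_py values (parse_project_url_values_py values)

-- ===== LEMMAS AND PROOFS =====

theorem pvDisjoint (l : String) (h : l ∈ pvHomeLabels) : l ∉ pvRepoLabels := by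
  simp only [pvHomeLabels, List.mem_cons, List.not_mem_nil, or_false] at h
  rcases h with h | h | h <;> subst h <;> decide

theorem pvInsH (h r v : String) :
    (PySem.Dict.mk [("homepage", h), ("repository", r)]).insert "homepage" v
      = PySem.Dict.mk [("homepage", v), ("repository", r)] := by
  rfl

theorem pvInsR (h r v : String) :
    (PySem.Dict.mk [("homepage", h), ("repository", r)]).insert "repository" v
      = PySem.Dict.mk [("homepage", h), ("repository", v)] := by
  rfl

theorem pvGetH (h r : String) :
    (PySem.Dict.mk [("homepage", h), ("repository", r)]).getD "homepage" "" = h := by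
  rfl

theorem pvGetR (h r : String) :
    (PySem.Dict.mk [("homepage", h), ("repository", r)]).getD "repository" "" = r := by
  rfl

-- the loop invariant: A's fold from state (h, r) ends with each field kept if already
-- non-empty, else taken as B's first match over the normalized pairs
theorem pvLoop (vs : List String) (h r : String) :
    (vs.foldl pvStepA (PySem.Dict.mk [("homepage", h), ("repository", r)])).items
      = [("homepage", if h = "" then pvNextD (fun p => decide (p.1 ∈ pvHomeLabels)) (pvPairs vs) else h),
         ("repository", if r = "" then pvNextD (fun p => decide (p.1 ∈ pvRepoLabels)) (pvPairs vs) else r)] := by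
  induction vs generalizing h r with
  | nil =>
    simp [pvPairs, pvNextD]
  | cons item vs ih =>
    simp only [List.foldl_cons]
    by_cases hc : PySem.Chars.isIn [','] item.toList = false
    · have hp : pvPairs (item :: vs) = pvPairs vs := by
        simp [pvPairs, hc]
      rw [show pvStepA (PySem.Dict.mk [("homepage", h), ("repository", r)]) item
            = PySem.Dict.mk [("homepage", h), ("repository", r)] by
          simp [pvStepA, hc]]
      rw [ih, hp]
    · rw [Bool.not_eq_false] at hc
      set l := PySem.Str.lower (PySem.Str.strip (((PySem.Str.splitMax? item "," 1).getD [])[0]?.getD "")) with hl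
      set u := PySem.Str.strip (((PySem.Str.splitMax? item "," 1).getD [])[1]?.getD "") with hu
      by_cases hue : u = ""
      · have hp : pvPairs (item :: vs) = pvPairs vs := by
          simp [pvPairs, hc, ← hl, ← hu, hue]
        rw [show pvStepA (PySem.Dict.mk [("homepage", h), ("repository", r)]) item
              = PySem.Dict.mk [("homepage", h), ("repository", r)] by
            simp [pvStepA, hc, ← hu, hue]]
        rw [ih, hp]
      · have hp : pvPairs (item :: vs) = (l, u) :: pvPairs vs := by
          simp [pvPairs, hc, ← hl, ← hu, hue]
        rw [hp]
        by_cases hH : l ∈ pvHomeLabels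
        · have hR : l ∉ pvRepoLabels := pvDisjoint l hH
          have hfindH : (((l, u) :: pvPairs vs).find? (fun p => decide (p.1 ∈ pvHomeLabels))) = some (l, u) := by
            simp [hH]
          have hfindR : pvNextD (fun p => decide (p.1 ∈ pvRepoLabels)) ((l, u) :: pvPairs vs)
              = pvNextD (fun p => decide (p.1 ∈ pvRepoLabels)) (pvPairs vs) := by
            simp [pvNextD, hR]
          by_cases hh : h = ""
          · rw [show pvStepA (PySem.Dict.mk [("homepage", h), ("repository", r)]) item
                  = PySem.Dict.mk [("homepage", u), ("repository", r)] by
                simp [pvStepA, hc, ← hl, ← hu, hue, hH, pvGetH, hh, pvInsH]]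
            rw [ih, hfindR]
            simp [pvNextD, hfindH, hh, hue]
          · rw [show pvStepA (PySem.Dict.mk [("homepage", h), ("repository", r)]) item
                  = PySem.Dict.mk [("homepage", h), ("repository", r)] by
                simp [pvStepA, hc, ← hl, ← hu, hue, hH, hR, pvGetH, hh]]
            rw [ih, hfindR]
            simp [hh]
        · by_cases hR : l ∈ pvRepoLabels
          · have hfindR : (((l, u) :: pvPairs vs).find? (fun p => decide (p.1 ∈ pvRepoLabels))) = some (l, u) := by
              simp [hR]
            have hfindH : pvNextD (fun p => decide (p.1 ∈ pvHomeLabels)) ((l, u) :: pvPairs vs)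
                = pvNextD (fun p => decide (p.1 ∈ pvHomeLabels)) (pvPairs vs) := by
              simp [pvNextD, hH]
            by_cases hr : r = ""
            · rw [show pvStepA (PySem.Dict.mk [("homepage", h), ("repository", r)]) item
                    = PySem.Dict.mk [("homepage", h), ("repository", u)] by
                  simp [pvStepA, hc, ← hl, ← hu, hue, hH, hR, pvGetR, hr, pvInsR]]
              rw [ih, hfindH]
              simp [pvNextD, hfindR, hr, hue]
            · rw [show pvStepA (PySem.Dict.mk [("homepage", h), ("repository", r)]) item
                    = PySem.Dict.mk [("homepage", h), ("repository", r)] by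
                  simp [pvStepA, hc, ← hl, ← hu, hue, hH, hR, pvGetR, hr]]
              rw [ih, hfindH]
              simp [hr]
          · rw [show pvStepA (PySem.Dict.mk [("homepage", h), ("repository", r)]) item
                  = PySem.Dict.mk [("homepage", h), ("repository", r)] by
                simp [pvStepA, hc, ← hl, ← hu, hue, hH, hR]]
            rw [ih]
            simp [pvNextD, hH, hR]

-- ===== VERDICT (by name: the statement is the Claim_ definition above) =====
theorem parse_project_url_values_py_spec : Claim_equal_parse_project_url_values_py := by
  intro values _
  unfold Spec_parse_project_url_values_py parse_project_url_values_py parse_project_url_values_py_alt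
  match values with
  | none => rfl
  | some vs =>
    by_cases he : vs = []
    · subst he; rfl
    · simp only [he, if_false]
      have : ((PySem.Dict.empty.insert "homepage" "").insert "repository" "" : PySem.Dict String String)
          = PySem.Dict.mk [("homepage", ""), ("repository", "")] := by rfl
      rw [this, pvLoop]
      simp
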